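-- pv_equiv track=rewrite | github.com/mettlsi1/BMLD-Inf2-MediMate | views/Kalender.py | are_all_medications_taken_for_day
-- ===== SOURCE A (Python) =====
-- def are_all_medications_taken_for_day(medications, current_date, taken_list):
--     """
--     Prüft, ob alle Medikamente eines bestimmten Tages eingenommen wurden.
--     """
--     all_meds_for_day = []
--     times_of_day = ["Morgen", "Mittag", "Abend"]
--
--     for zeit in times_of_day:
--         for med_idx, med in enumerate(medications):
--             if med.get("Zeit") == zeit:
--                 med_key = f"{current_date}_{zeit}_{med['Name']}_{med_idx}"
--                 all_meds_for_day.append(med_key)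
--
--     # Prüfe ob alle Medikamente des Tages in der taken_list sind
--     return len(all_meds_for_day) > 0 and all(med_key in taken_list for med_key in all_meds_for_day)
-- ===== SOURCE B (Python) =====
-- def are_all_medications_taken_for_day(medications, current_date, taken_list):
--     """Single fused pass: short-circuit on the first missing key, remember if any med matched."""
--     found = False
--     for med_idx, med in enumerate(medications):
--         zeit = med.get("Zeit")
--         if zeit in ("Morgen", "Mittag", "Abend"):
--             med_key = f"{current_date}_{zeit}_{med['Name']}_{med_idx}"
--             if med_key not in taken_list:
--                 return False
--             found = True
--     return found
-- ===== Notes on version B (the rewrite author's own statement) =====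
-- stated objective: simpler
-- what changed: Replaces the build-then-scan structure (outer loop over the three times of day building an intermediate key list, then a full membership scan) by one short-circuiting pass over enumerate(medications) with a found flag and no temporary list.
import Mathlib
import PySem

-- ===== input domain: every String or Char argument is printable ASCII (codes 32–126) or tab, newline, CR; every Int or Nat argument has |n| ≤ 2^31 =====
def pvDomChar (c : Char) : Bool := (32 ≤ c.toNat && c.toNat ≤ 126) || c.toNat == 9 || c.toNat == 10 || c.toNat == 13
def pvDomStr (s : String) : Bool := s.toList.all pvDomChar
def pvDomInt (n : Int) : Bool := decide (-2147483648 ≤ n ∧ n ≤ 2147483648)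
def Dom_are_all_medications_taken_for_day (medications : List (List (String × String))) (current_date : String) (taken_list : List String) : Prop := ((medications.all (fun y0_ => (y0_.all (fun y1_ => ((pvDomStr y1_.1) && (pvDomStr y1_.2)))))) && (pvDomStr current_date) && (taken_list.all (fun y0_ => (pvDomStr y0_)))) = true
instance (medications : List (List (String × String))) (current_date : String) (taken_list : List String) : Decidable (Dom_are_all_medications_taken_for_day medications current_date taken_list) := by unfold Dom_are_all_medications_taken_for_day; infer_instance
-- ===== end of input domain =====

-- B replaces A's build-then-scan (outer loop over the three times building a key list, then a
-- membership scan) by one short-circuiting pass over the enumerated medications with a found flag.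

-- ===== PORT A =====
-- dicts are association lists; med.get(k) / med[k] is first-match lookup = List.lookup.
-- med["Name"] raises KeyError when absent; Pre_ excludes that, the port reads getD "" there.
def are_all_medications_taken_for_day (medications : List (List (String × String))) (current_date : String) (taken_list : List String) : Bool :=
  let all_meds_for_day : List String :=
    (["Morgen", "Mittag", "Abend"]).foldl (fun acc zeit =>
      (PySem.List.enumerate medications).foldl (fun acc2 p =>
        if List.lookup "Zeit" p.2 = some zeit then
          acc2 ++ [current_date ++ "_" ++ zeit ++ "_" ++ ((List.lookup "Name" p.2).getD "") ++ "_" ++ PySem.Int.toStr p.1]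
        else acc2) acc) []
  decide (all_meds_for_day.length > 0) && all_meds_for_day.all (fun med_key => taken_list.contains med_key)

-- ===== PORT B =====
def pvAltLoop (current_date : String) (taken_list : List String) : List (Int × List (String × String)) → Bool → Bool
  | [], found => found
  | (med_idx, med) :: rest, found =>
    match List.lookup "Zeit" med with
    | some zeit =>
      if zeit = "Morgen" ∨ zeit = "Mittag" ∨ zeit = "Abend" then
        let med_key := current_date ++ "_" ++ zeit ++ "_" ++ ((List.lookup "Name" med).getD "") ++ "_" ++ PySem.Int.toStr med_idx
        if taken_list.contains med_key then pvAltLoop current_date taken_list rest true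
        else false
      else pvAltLoop current_date taken_list rest found
    | none => pvAltLoop current_date taken_list rest found

def are_all_medications_taken_for_day_alt (medications : List (List (String × String))) (current_date : String) (taken_list : List String) : Bool :=
  pvAltLoop current_date taken_list (PySem.List.enumerate medications) false

-- ===== PRECONDITION & SPEC =====
-- Pre_ excludes exactly the inputs where Python A raises KeyError: a medication whose "Zeit" is
-- one of the three times of day but which has no "Name" key.
def Pre_are_all_medications_taken_for_day (medications : List (List (String × String))) (current_date : String) (taken_list : List String) : Prop :=
  ∀ med ∈ medications,
    (List.lookup "Zeit" med = some "Morgen" ∨ List.lookup "Zeit" med = some "Mittag" ∨ List.lookup "Zeit" med = some "Abend") →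
    (List.lookup "Name" med).isSome = true
instance (medications : List (List (String × String))) (current_date : String) (taken_list : List String) : Decidable (Pre_are_all_medications_taken_for_day medications current_date taken_list) := by unfold Pre_are_all_medications_taken_for_day; infer_instance

def pvWitness_are_all_medications_taken_for_day : (List (List (String × String))) × String × List String :=
  ([[("Zeit", "Morgen"), ("Name", "Aspirin")]], "2024-01-01", ["2024-01-01_Morgen_Aspirin_0"])

def Spec_are_all_medications_taken_for_day (medications : List (List (String × String))) (current_date : String) (taken_list : List String) (out : Bool) : Prop := out = are_all_medications_taken_for_day_alt medications current_date taken_list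
instance (medications : List (List (String × String))) (current_date : String) (taken_list : List String) (out : Bool) : Decidable (Spec_are_all_medications_taken_for_day medications current_date taken_list out) := by unfold Spec_are_all_medications_taken_for_day; infer_instance

-- ===== CLAIM (what is proved, stated in full; the proofs are below) =====
def Claim_equal_are_all_medications_taken_for_day : Prop := ∀ (medications : List (List (String × String))) (current_date : String) (taken_list : List String), Dom_are_all_medications_taken_for_day medications current_date taken_list → Pre_are_all_medications_taken_for_day medications current_date taken_list → Spec_are_all_medications_taken_for_day medications current_date taken_list (are_all_medications_taken_for_day medications current_date taken_list)

-- ===== LEMMAS AND PROOFS =====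

-- proof-side abbreviations
def pvKeyOf (cd : String) (p : Int × List (String × String)) : String :=
  cd ++ "_" ++ ((List.lookup "Zeit" p.2).getD "") ++ "_" ++ ((List.lookup "Name" p.2).getD "") ++ "_" ++ PySem.Int.toStr p.1

def pvRel (p : Int × List (String × String)) : Bool :=
  (List.lookup "Zeit" p.2 == some "Morgen") || (List.lookup "Zeit" p.2 == some "Mittag") || (List.lookup "Zeit" p.2 == some "Abend")

-- A's inner append loop is filter-then-map
theorem pv_foldl_if_append {α β : Type} (p : α → Prop) [DecidablePred p] (f : α → β) :
    ∀ (l : List α) (acc : List β),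
      l.foldl (fun acc2 x => if p x then acc2 ++ [f x] else acc2) acc
        = acc ++ (l.filter (fun x => decide (p x))).map f := by
  intro l
  induction l with
  | nil => simp
  | cons x xs ih =>
    intro acc
    by_cases h : p x <;> simp [List.foldl_cons, h, ih]

-- B's loop characterised: it returns (found-or-some-relevant) && (all relevant keys taken)
theorem pvAltLoop_eq (cd : String) (tk : List String) :
    ∀ (l : List (Int × List (String × String))) (found : Bool),
      pvAltLoop cd tk l found
        = ((found || l.any pvRel) && (l.filter pvRel).all (fun p => tk.contains (pvKeyOf cd p))) := by
  intro l
  induction l with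
  | nil => intro found; simp [pvAltLoop]
  | cons q rest ih =>
    intro found
    obtain ⟨i, med⟩ := q
    cases h : List.lookup "Zeit" med with
    | none => simp [pvAltLoop, h, ih, pvRel]
    | some zeit =>
      by_cases hz : zeit = "Morgen" ∨ zeit = "Mittag" ∨ zeit = "Abend"
      · have hrel : pvRel (i, med) = true := by
          simp only [pvRel, h]
          rcases hz with h1 | h1 | h1 <;> simp [h1]
        by_cases hc : tk.contains (cd ++ "_" ++ zeit ++ "_" ++ ((List.lookup "Name" med).getD "") ++ "_" ++ PySem.Int.toStr i) = true
        · have hk : pvKeyOf cd (i, med) = cd ++ "_" ++ zeit ++ "_" ++ ((List.lookup "Name" med).getD "") ++ "_" ++ PySem.Int.toStr i := by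
            simp [pvKeyOf, h]
          simp [pvAltLoop, h, hz, hc, ih, hrel, hk]
        · have hk : pvKeyOf cd (i, med) = cd ++ "_" ++ zeit ++ "_" ++ ((List.lookup "Name" med).getD "") ++ "_" ++ PySem.Int.toStr i := by
            simp [pvKeyOf, h]
          have hc' : tk.contains (pvKeyOf cd (i, med)) = false := by
            rw [hk]; exact Bool.eq_false_iff.mpr hc
          simp [pvAltLoop, h, hz, ih, hrel, hc', Bool.eq_false_iff.mpr hc]
          rw [hk]
      · have hrel : pvRel (i, med) = false := by
          simp only [pvRel, h]
          push_neg at hz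
          simp [hz.1, hz.2.1, hz.2.2]
        simp [pvAltLoop, h, hz, ih, hrel]

-- membership in A's built key list
theorem pv_mem_A_list (cd : String) (e : List (Int × List (String × String))) (k : String) :
    (k ∈ (["Morgen", "Mittag", "Abend"] : List String).foldl (fun acc zeit =>
        e.foldl (fun acc2 p =>
          if List.lookup "Zeit" p.2 = some zeit then
            acc2 ++ [cd ++ "_" ++ zeit ++ "_" ++ ((List.lookup "Name" p.2).getD "") ++ "_" ++ PySem.Int.toStr p.1]
          else acc2) acc) [])
      ↔ ∃ p ∈ e, pvRel p = true ∧ k = pvKeyOf cd p := by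
  simp only [List.foldl_cons, List.foldl_nil]
  rw [pv_foldl_if_append, pv_foldl_if_append, pv_foldl_if_append]
  simp only [List.nil_append, List.mem_append, List.mem_map, List.mem_filter]
  constructor
  · rintro ((⟨p, ⟨hp, hz⟩, rfl⟩ | ⟨p, ⟨hp, hz⟩, rfl⟩) | ⟨p, ⟨hp, hz⟩, rfl⟩) <;>
      (simp only [decide_eq_true_eq] at hz;
       exact ⟨p, hp, by simp [pvRel, hz], by simp [pvKeyOf, hz]⟩)
  · rintro ⟨p, hp, hrel, rfl⟩
    have hrel' : List.lookup "Zeit" p.2 = some "Morgen" ∨ List.lookup "Zeit" p.2 = some "Mittag" ∨ List.lookup "Zeit" p.2 = some "Abend" := by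
      simpa [pvRel, or_assoc] using hrel
    refine hrel'.elim (fun hz => Or.inl (Or.inl ⟨p, ⟨hp, ?_⟩, ?_⟩))
      (fun h2 => h2.elim (fun hz => Or.inl (Or.inr ⟨p, ⟨hp, ?_⟩, ?_⟩))
        (fun hz => Or.inr ⟨p, ⟨hp, ?_⟩, ?_⟩)) <;>
      simp [pvKeyOf, hz]

-- ===== VERDICT (by name: the statement is the Claim_ definition above) =====
theorem are_all_medications_taken_for_day_spec : Claim_equal_are_all_medications_taken_for_day := by
  intro medications current_date taken_list _ _
  unfold Spec_are_all_medications_taken_for_day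
  unfold are_all_medications_taken_for_day are_all_medications_taken_for_day_alt
  rw [pvAltLoop_eq]
  set e := PySem.List.enumerate medications with he
  set L := (["Morgen", "Mittag", "Abend"] : List String).foldl (fun acc zeit =>
      e.foldl (fun acc2 p =>
        if List.lookup "Zeit" p.2 = some zeit then
          acc2 ++ [current_date ++ "_" ++ zeit ++ "_" ++ ((List.lookup "Name" p.2).getD "") ++ "_" ++ PySem.Int.toStr p.1]
        else acc2) acc) [] with hL
  have hmem := pv_mem_A_list current_date e
  rw [Bool.eq_iff_iff]
  simp only [Bool.and_eq_true, decide_eq_true_eq, List.all_eq_true, Bool.or_eq_true,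
    Bool.false_or, List.any_eq_true, List.mem_filter, ← hL]
  constructor
  · rintro ⟨hlen, hall⟩
    have hne : L ≠ [] := by
      intro h0; rw [h0] at hlen; simp at hlen
    obtain ⟨k, hk⟩ := List.exists_mem_of_ne_nil L hne
    obtain ⟨p, hp, hrel, rfl⟩ := (hmem k).mp hk
    refine ⟨⟨p, hp, hrel⟩, ?_⟩
    intro q ⟨hq, hqrel⟩
    exact hall _ ((hmem _).mpr ⟨q, hq, hqrel, rfl⟩)
  · rintro ⟨⟨p, hp, hrel⟩, hall⟩
    have hkL : pvKeyOf current_date p ∈ L := (hmem _).mpr ⟨p, hp, hrel, rfl⟩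
    refine ⟨List.length_pos_of_mem hkL, ?_⟩
    intro k hk
    obtain ⟨q, hq, hqrel, rfl⟩ := (hmem k).mp hk
    exact hall q ⟨hq, hqrel⟩
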